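-- pv_equiv track=rewrite | github.com/sueszli/vector-database-benchmark | dataset/python-mutated/Misc.py | ProcessEdkComment
-- ===== SOURCE A (Python) =====
-- def ProcessEdkComment(LineList):
--     if False:
--         i = 10
--         return i + 15
--     FindEdkBlockComment = False
--     Count = 0
--     StartPos = -1
--     EndPos = -1
--     FirstPos = -1
--     while Count < len(LineList):
--         Line = LineList[Count].strip()
--         if Line.startswith('/*'):
--             StartPos = Count
--             while Count < len(LineList):
--                 Line = LineList[Count].strip()
--                 if Line.endswith('*/'):
--                     if Count == StartPos and Line.strip() == '/*/':
--                         Count = Count + 1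
--                         continue
--                     EndPos = Count
--                     FindEdkBlockComment = True
--                     break
--                 Count = Count + 1
--             if FindEdkBlockComment:
--                 if FirstPos == -1:
--                     FirstPos = StartPos
--                 for Index in range(StartPos, EndPos + 1):
--                     LineList[Index] = ''
--                 FindEdkBlockComment = False
--         elif Line.find('//') != -1 and (not Line.startswith('#')):
--             LineList[Count] = Line.replace('//', '#')
--             if FirstPos == -1:
--                 FirstPos = Count
--         Count = Count + 1
--     return (LineList, FirstPos)
-- ===== SOURCE B (Python) =====
-- def ProcessEdkComment(LineList):
--     out = []
--     pending = []
--     in_block = False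
--     start = -1
--     first = -1
--     for i, line in enumerate(LineList):
--         s = line.strip()
--         if in_block:
--             if s.endswith('*/'):
--                 out.extend([''] * (len(pending) + 1))
--                 if first == -1:
--                     first = start
--                 pending = []
--                 in_block = False
--             else:
--                 pending.append(line)
--         elif s.startswith('/*'):
--             if s.endswith('*/') and s != '/*/':
--                 out.append('')
--                 if first == -1:
--                     first = i
--             else:
--                 in_block = True
--                 start = i
--                 pending = [line]
--         elif s.find('//') != -1 and not s.startswith('#'):
--             out.append(s.replace('//', '#'))
--             if first == -1:
--                 first = i
--         else:
--             out.append(line)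
--     out.extend(pending)
--     return (out, first)
-- ===== Notes on version B (the rewrite author's own statement) =====
-- stated objective: simpler
-- what changed: A's nested outer/inner while loops that mutate LineList in place by index (re-scanning and blanking ranges with an inner loop and a range-for) are replaced by a single forward pass over the lines that carries an in-block flag and a pending buffer, emitting blanks when a block closes and flushing the buffer unchanged if it never closes; B builds a fresh list instead of mutating the argument.
import Mathlib
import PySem

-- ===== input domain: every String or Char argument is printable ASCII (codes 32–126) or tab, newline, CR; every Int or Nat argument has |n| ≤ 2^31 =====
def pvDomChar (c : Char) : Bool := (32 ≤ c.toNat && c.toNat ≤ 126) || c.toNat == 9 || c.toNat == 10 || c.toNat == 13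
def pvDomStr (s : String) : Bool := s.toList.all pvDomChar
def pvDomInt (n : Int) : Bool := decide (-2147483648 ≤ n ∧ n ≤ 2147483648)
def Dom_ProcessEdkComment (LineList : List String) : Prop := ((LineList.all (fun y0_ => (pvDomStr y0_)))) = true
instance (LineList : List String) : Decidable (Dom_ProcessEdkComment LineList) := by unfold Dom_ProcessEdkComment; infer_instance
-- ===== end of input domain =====

-- B replaces A's nested outer/inner index loops (which blank EDK /*..*/ blocks in place and turn // into #)
-- by one forward pass that buffers the lines of an open block and flushes blanks when it closes; objective:
-- simpler. A mutates LineList in place and returns it; B builds a fresh list — equivalence is about the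
-- RETURN value only.

-- ===== PORT A =====
-- A's dead `if False:` block is unreachable and not ported.
-- inner `while Count < len(LineList)` loop, searching for a line ending in '*/'
-- (with the '/*/' self-exemption at the start line); returns the Count at the `break`,
-- none if the loop runs off the end.  `fuel` only makes the loop total: it is called
-- with fuel > len(LineList) - count, more than the iterations the while loop can make.
def pvInnerA : Nat → List String → Nat → Nat → Option Nat
  | 0, _, _, _ => none
  | fuel + 1, ls, startPos, count =>
    if count < ls.length then
      -- Line = LineList[Count].strip(), inlined; the index is in range by the loop guard, so getD is exact
      if PySem.Str.endswith (PySem.Str.strip (ls.getD count "")) "*/" then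
        if count = startPos ∧ PySem.Str.strip (PySem.Str.strip (ls.getD count "")) = "/*/" then
          pvInnerA fuel ls startPos (count + 1)
        else some count
      else pvInnerA fuel ls startPos (count + 1)
    else none

-- `for Index in range(StartPos, EndPos + 1): LineList[Index] = ''`
def pvBlank (ls : List String) (a b : Nat) : List String :=
  (List.range' a (b + 1 - a)).foldl (fun l i => l.set i "") ls

-- outer `while Count < len(LineList)` loop of A; again fuel > len(LineList) - count
-- only bounds the iterations (Count strictly increases each time round the loop)
def pvOuterA : Nat → List String → Nat → Int → List String × Int
  | 0, ls, _, first => (ls, first)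
  | fuel + 1, ls, count, first =>
    if count < ls.length then
      -- Line = LineList[Count].strip(), inlined
      if PySem.Str.startswith (PySem.Str.strip (ls.getD count "")) "/*" then
        match pvInnerA (ls.length + 1) ls count count with
        | some e =>
            -- FindEdkBlockComment: blank StartPos..EndPos, set FirstPos, continue at EndPos+1
            pvOuterA fuel (pvBlank ls count e) (e + 1)
              (if first = -1 then (count : Int) else first)
        | none => (ls, first)   -- inner loop exhausted the list; outer loop then also ends
      else if PySem.Str.find (PySem.Str.strip (ls.getD count "")) "//" ≠ -1 ∧
          ¬ PySem.Str.startswith (PySem.Str.strip (ls.getD count "")) "#" then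
        pvOuterA fuel (ls.set count (PySem.Str.replace (PySem.Str.strip (ls.getD count "")) "//" "#")) (count + 1)
          (if first = -1 then (count : Int) else first)
      else pvOuterA fuel ls (count + 1) first
    else (ls, first)

def ProcessEdkComment (LineList : List String) : List String × Int :=
  pvOuterA (LineList.length + 1) LineList 0 (-1)

-- ===== PORT B =====
-- B's single `for i, line in enumerate(LineList)` loop, carried as structural recursion over the
-- remaining lines with the loop state (out, pending, in_block, start, first) as arguments.
def pvGoB : List String → Nat → List String → List String → Bool → Int → Int → List String × Int
  | [], _, out, pending, _, _, first => (out ++ pending, first)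
  | line :: rest, i, out, pending, inBlock, start, first =>
    -- s = line.strip(), inlined
    if inBlock then
      if PySem.Str.endswith (PySem.Str.strip line) "*/" then
        pvGoB rest (i + 1) (out ++ List.replicate (pending.length + 1) "") [] false start
          (if first = -1 then start else first)
      else
        pvGoB rest (i + 1) out (pending ++ [line]) true start first
    else if PySem.Str.startswith (PySem.Str.strip line) "/*" then
      if PySem.Str.endswith (PySem.Str.strip line) "*/" ∧ PySem.Str.strip line ≠ "/*/" then
        pvGoB rest (i + 1) (out ++ [""]) [] false start
          (if first = -1 then (i : Int) else first)
      else
        pvGoB rest (i + 1) out [line] true (i : Int) first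
    else if PySem.Str.find (PySem.Str.strip line) "//" ≠ -1 ∧
        ¬ PySem.Str.startswith (PySem.Str.strip line) "#" then
      pvGoB rest (i + 1) (out ++ [PySem.Str.replace (PySem.Str.strip line) "//" "#"]) pending inBlock start
        (if first = -1 then (i : Int) else first)
    else
      pvGoB rest (i + 1) (out ++ [line]) pending inBlock start first

def ProcessEdkComment_alt (LineList : List String) : List String × Int :=
  pvGoB LineList 0 [] [] false (-1) (-1)

-- ===== PRECONDITION & SPEC =====
def Spec_ProcessEdkComment (LineList : List String) (out : List String × Int) : Prop := out = ProcessEdkComment_alt LineList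
instance (LineList : List String) (out : List String × Int) : Decidable (Spec_ProcessEdkComment LineList out) := by unfold Spec_ProcessEdkComment; infer_instance

-- ===== CLAIM (what is proved, stated in full; the proofs are below) =====
def Claim_equal_ProcessEdkComment : Prop := ∀ (LineList : List String), Dom_ProcessEdkComment LineList → Spec_ProcessEdkComment LineList (ProcessEdkComment LineList)

-- ===== LEMMAS AND PROOFS =====

-- Python's str.strip is idempotent
lemma pvCharsStrip_prefix_fix : ∀ {l m : List Char},
    l.dropWhile PySem.Chars.isspace = l → m <+: l → m.dropWhile PySem.Chars.isspace = m := by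
  intro l m hl hm
  cases m with
  | nil => rfl
  | cons c t =>
      obtain ⟨r, hr⟩ := hm
      subst hr
      by_cases hc : PySem.Chars.isspace c
      · exfalso
        have h1 : ((c :: t) ++ r).dropWhile PySem.Chars.isspace
            = (t ++ r).dropWhile PySem.Chars.isspace := by
          simp [hc]
        have h2 := List.length_dropWhile_le PySem.Chars.isspace (t ++ r)
        rw [h1] at hl
        have h3 := congrArg List.length hl
        simp at h3 h2
        omega
      · simp [hc]

lemma pvCharsStrip_idem (l : List Char) :
    PySem.Chars.strip (PySem.Chars.strip l) = PySem.Chars.strip l := by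
  unfold PySem.Chars.strip PySem.Chars.rstrip PySem.Chars.lstrip
  set p := PySem.Chars.isspace
  set L := l.dropWhile p with hLdef
  have hL : L.dropWhile p = L := List.dropWhile_idempotent p l
  set R := (L.reverse.dropWhile p).reverse with hRdef
  have hpre : R <+: L := by
    rw [hRdef]
    have : (L.reverse.dropWhile p) <:+ L.reverse := List.dropWhile_suffix p
    have := List.reverse_prefix.mpr this
    simpa using this
  have h1 : R.dropWhile p = R := pvCharsStrip_prefix_fix hL hpre
  rw [h1]
  rw [hRdef]
  simp [List.dropWhile_idempotent]

lemma pvStrStrip_idem (s : String) :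
    PySem.Str.strip (PySem.Str.strip s) = PySem.Str.strip s := by
  apply String.toList_inj.mp
  simp [pvCharsStrip_idem]

-- first index (from the front of `rest`) of a line whose stripped form ends in '*/'
def pvFindEnd (rest : List String) : Option Nat :=
  rest.findIdx? (fun l => PySem.Str.endswith (PySem.Str.strip l) "*/")

lemma pvFindEnd_lt {rest : List String} {k : Nat} (h : pvFindEnd rest = some k) :
    k < rest.length := by
  unfold pvFindEnd at h
  have := List.findIdx?_eq_some_iff_findIdx_eq.mp h
  omega

-- A's inner loop past the start line is a plain search for the next closing line
lemma pvInnerA_after : ∀ (fuel : Nat) (ls : List String) (sp c : Nat),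
    ls.length - c < fuel → sp < c →
    pvInnerA fuel ls sp c = (pvFindEnd (ls.drop c)).map (· + c) := by
  intro fuel
  induction fuel with
  | zero => intro ls sp c hn _; omega
  | succ fuel ih =>
      intro ls sp c hn hsp
      by_cases h : c < ls.length
      · rw [pvInnerA, if_pos h]
        rw [List.drop_eq_getElem_cons h]
        rw [List.getD_eq_getElem ls "" h]
        unfold pvFindEnd
        rw [List.findIdx?_cons]
        have hcsp : ¬ c = sp := by omega
        by_cases hend : PySem.Str.endswith (PySem.Str.strip ls[c]) "*/" = true
        · have hend' : PySem.Chars.endswith (PySem.Chars.strip ls[c].toList) ['*', '/'] = true := by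
            simpa using hend
          simp [hend', hcsp]
        · rw [ih ls sp (c + 1) (by omega) (by omega)]
          unfold pvFindEnd
          simp only [hend, Bool.false_eq_true, if_false]
          cases hfe : (ls.drop (c + 1)).findIdx?
              (fun l => PySem.Str.endswith (PySem.Str.strip l) "*/") with
          | none => simp
          | some k =>
              simp only [Option.map_some, Option.some.injEq]
              omega
      · rw [pvInnerA, if_neg h]
        rw [List.drop_eq_nil_of_le (by omega)]
        simp [pvFindEnd]

-- B's in-block phase: scan to the next closing line, flush blanks, resume out of block
lemma pvGoB_inblock : ∀ (rest : List String) (i : Nat) (out pending : List String) (start first : Int),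
    pvGoB rest i out pending true start first =
      match pvFindEnd rest with
      | none => (out ++ pending ++ rest, first)
      | some k =>
          pvGoB (rest.drop (k + 1)) (i + (k + 1))
            (out ++ List.replicate (pending.length + (k + 1)) "") [] false start
            (if first = -1 then start else first) := by
  intro rest
  induction rest with
  | nil => intro i out pending start first; simp [pvGoB, pvFindEnd]
  | cons line rest' ih =>
      intro i out pending start first
      rw [pvGoB]
      simp only
      by_cases hend : PySem.Str.endswith (PySem.Str.strip line) "*/"
      · rw [if_pos hend]
        unfold pvFindEnd
        rw [List.findIdx?_cons, if_pos hend]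
        simp
      · rw [if_neg hend]
        rw [ih]
        unfold pvFindEnd
        rw [List.findIdx?_cons, if_neg hend]
        cases hfe : rest'.findIdx? (fun l => PySem.Str.endswith (PySem.Str.strip l) "*/") with
        | none => simp
        | some k =>
            simp only [Option.map_some]
            have e1 : i + 1 + (k + 1) = i + (k + 1 + 1) := by omega
            have e2 : (pending ++ [line]).length + (k + 1) = pending.length + (k + 1 + 1) := by
              simp; omega
            rw [e1, e2]
            simp

lemma pvSet_append_len (P : List String) (x v : String) (T : List String) :
    (P ++ x :: T).set P.length v = P ++ v :: T := by
  simp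

lemma pvGetD_append_len (P : List String) (x d : String) (T : List String) :
    (P ++ x :: T).getD P.length d = x := by
  simp [List.getD_eq_getElem?_getD]

lemma pvFoldlSet_range' : ∀ (M P S : List String),
    (List.range' P.length M.length).foldl (fun l i => l.set i "") (P ++ M ++ S)
      = P ++ List.replicate M.length "" ++ S := by
  intro M
  induction M with
  | nil => intro P S; simp
  | cons x M' ih =>
      intro P S
      rw [List.length_cons, List.range'_succ, List.foldl_cons]
      have h1 : (P ++ x :: M' ++ S).set P.length "" = P ++ "" :: (M' ++ S) := by
        have := pvSet_append_len P x "" (M' ++ S)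
        simpa using this
      rw [h1]
      have h2 : P ++ "" :: (M' ++ S) = (P ++ [""]) ++ M' ++ S := by simp
      rw [h2]
      have h3 : P.length + 1 = (P ++ [""]).length := by simp
      rw [h3, ih (P ++ [""]) S]
      simp [List.replicate_succ]

lemma pvBlank_append (P M S : List String) (hM : M ≠ []) :
    pvBlank (P ++ M ++ S) P.length (P.length + M.length - 1)
      = P ++ List.replicate M.length "" ++ S := by
  unfold pvBlank
  have hM1 : 1 ≤ M.length := by cases M with | nil => exact absurd rfl hM | cons _ _ => simp
  have : P.length + M.length - 1 + 1 - P.length = M.length := by omega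
  rw [this]
  exact pvFoldlSet_range' M P S

-- the main loop correspondence: A's outer loop from index P.length on P ++ rest
-- is B's out-of-block scan of rest with output accumulator P
lemma pvMain : ∀ (n : Nat) (rest P : List String) (start first : Int),
    rest.length < n →
    pvOuterA n (P ++ rest) P.length first = pvGoB rest P.length P [] false start first := by
  intro n
  induction n with
  | zero => intro rest P start first hn; omega
  | succ n ih =>
      intro rest P start first hn
      cases rest with
      | nil =>
          rw [pvOuterA, if_neg (by simp)]
          simp [pvGoB]
      | cons line rest' =>
          have hidx : P.length < (P ++ line :: rest').length := by simp
          have hget : (P ++ line :: rest').getD P.length "" = line := pvGetD_append_len P line "" rest'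
          have hdrop : (P ++ line :: rest').drop (P.length + 1) = rest' := by
            simpa using List.drop_length_add_append (l₁ := P) (l₂ := line :: rest') 1
          have hss : PySem.Str.strip (PySem.Str.strip line) = PySem.Str.strip line :=
            pvStrStrip_idem line
          have hlen' : rest'.length < n := by simp at hn; omega
          rw [pvOuterA, if_pos hidx, hget]
          rw [pvGoB]
          simp only [Bool.false_eq_true, if_false]
          have hstep : pvInnerA ((P ++ line :: rest').length + 1) (P ++ line :: rest') P.length P.length
              = if PySem.Str.endswith (PySem.Str.strip line) "*/" = true then
                  (if P.length = P.length ∧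
                      PySem.Str.strip (PySem.Str.strip line) = "/*/" then
                    pvInnerA (P ++ line :: rest').length (P ++ line :: rest') P.length (P.length + 1)
                  else some P.length)
                else pvInnerA (P ++ line :: rest').length (P ++ line :: rest') P.length (P.length + 1) := by
            rw [pvInnerA, if_pos hidx, hget]
          have hafter : pvInnerA (P ++ line :: rest').length (P ++ line :: rest') P.length (P.length + 1)
              = (pvFindEnd rest').map (· + (P.length + 1)) := by
            rw [pvInnerA_after (P ++ line :: rest').length _ _ _ (by simp) (by omega), hdrop]
          by_cases hbeg : PySem.Str.startswith (PySem.Str.strip line) "/*" = true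
          · rw [if_pos hbeg, if_pos hbeg]
            by_cases hsingle : PySem.Str.endswith (PySem.Str.strip line) "*/" = true ∧
                PySem.Str.strip line ≠ "/*/"
            · -- single-line /* ... */ close
              have hin : pvInnerA ((P ++ line :: rest').length + 1) (P ++ line :: rest') P.length P.length = some P.length := by
                rw [hstep, if_pos hsingle.1, if_neg (fun hc => hsingle.2 (hss ▸ hc.2))]
              rw [if_pos hsingle]
              split
              next e heq =>
                rw [hin] at heq
                injection heq with he
                subst he
                have hb : pvBlank (P ++ [line] ++ rest') P.length (P.length + [line].length - 1)
                    = P ++ List.replicate [line].length "" ++ rest' :=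
                  pvBlank_append P [line] rest' (by simp)
                simp only [List.length_cons, List.length_nil, Nat.zero_add,
                  Nat.add_sub_cancel] at hb
                have hb' : pvBlank (P ++ line :: rest') P.length P.length
                    = P ++ [""] ++ rest' := by
                  simpa using hb
                rw [hb']
                have := ih rest' (P ++ [""]) start
                  (if first = -1 then (P.length : Int) else first) hlen'
                simp only [List.length_append, List.length_cons, List.length_nil,
                  Nat.zero_add] at this
                simpa using this
              next heq =>
                rw [hin] at heq
                simp at heq
            · -- enter block mode (also the '/*/' self-exemption case)
              have hin : pvInnerA ((P ++ line :: rest').length + 1) (P ++ line :: rest') P.length P.length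
                  = (pvFindEnd rest').map (· + (P.length + 1)) := by
                rw [hstep]
                by_cases hend : PySem.Str.endswith (PySem.Str.strip line) "*/" = true
                · have hsl : PySem.Str.strip line = "/*/" := by
                    by_contra hcon; exact hsingle ⟨hend, hcon⟩
                  rw [if_pos hend, if_pos ⟨rfl, hss.trans hsl⟩, hafter]
                · rw [if_neg hend, hafter]
              rw [if_neg hsingle]
              rw [pvGoB_inblock]
              cases hfe : pvFindEnd rest' with
              | none =>
                  rw [hfe] at hin
                  simp only [Option.map_none] at hin
                  split
                  next e heq =>
                    rw [hin] at heq
                    simp at heq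
                  next heq =>
                    simp
              | some k =>
                  have hk : k < rest'.length := pvFindEnd_lt hfe
                  rw [hfe] at hin
                  simp only [Option.map_some] at hin
                  split
                  next e heq =>
                    rw [hin] at heq
                    injection heq with he
                    subst he
                    have hsplit : P ++ line :: rest'
                        = P ++ (line :: rest'.take (k + 1)) ++ rest'.drop (k + 1) := by
                      rw [List.append_assoc, List.cons_append, List.take_append_drop]
                    have hMlen : (line :: rest'.take (k + 1)).length = k + 2 := by
                      simp [List.length_take]; omega
                    have hb := pvBlank_append P (line :: rest'.take (k + 1)) (rest'.drop (k + 1))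
                      (by simp)
                    rw [hMlen] at hb
                    have he1 : k + (P.length + 1) = P.length + (k + 2) - 1 := by omega
                    rw [hsplit, he1, hb]
                    have he2 : P.length + (k + 2) - 1 + 1
                        = (P ++ List.replicate (k + 2) "").length := by
                      simp; omega
                    rw [he2]
                    have := ih (rest'.drop (k + 1)) (P ++ List.replicate (k + 2) "")
                      ((P.length : Int))
                      (if first = -1 then (P.length : Int) else first)
                      (by simp [List.length_drop]; omega)
                    rw [this]
                    have he3 : (P ++ List.replicate (k + 2) "").length
                        = P.length + 1 + (k + 1) := by
                      simp; omega
                    have he4 : List.replicate (k + 2) (α := String) ""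
                        = List.replicate ([line].length + (k + 1)) "" := by simp; omega
                    rw [he3, he4]
                  next heq =>
                    rw [hin] at heq
                    simp at heq
          · rw [if_neg hbeg, if_neg hbeg]
            by_cases hcm : PySem.Str.find (PySem.Str.strip line) "//" ≠ -1 ∧
                ¬ PySem.Str.startswith (PySem.Str.strip line) "#"
            · rw [if_pos hcm, if_pos hcm]
              have hset : (P ++ line :: rest').set P.length
                    (PySem.Str.replace (PySem.Str.strip line) "//" "#")
                  = P ++ [PySem.Str.replace (PySem.Str.strip line) "//" "#"] ++ rest' := by
                simpa using pvSet_append_len P line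
                  (PySem.Str.replace (PySem.Str.strip line) "//" "#") rest'
              rw [hset]
              have := ih rest' (P ++ [PySem.Str.replace (PySem.Str.strip line) "//" "#"]) start
                (if first = -1 then (P.length : Int) else first) hlen'
              simp only [List.length_append, List.length_cons, List.length_nil,
                Nat.zero_add] at this
              simpa using this
            · rw [if_neg hcm, if_neg hcm]
              have hfull : P ++ line :: rest' = (P ++ [line]) ++ rest' := by simp
              rw [hfull]
              have := ih rest' (P ++ [line]) start first hlen'
              simp only [List.length_append, List.length_cons, List.length_nil,
                Nat.zero_add] at this
              simpa using this

-- ===== VERDICT (by name: the statement is the Claim_ definition above) =====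
theorem ProcessEdkComment_spec : Claim_equal_ProcessEdkComment := by
  intro LineList _
  unfold Spec_ProcessEdkComment ProcessEdkComment ProcessEdkComment_alt
  have := pvMain (LineList.length + 1) LineList [] (-1) (-1) (by omega)
  simpa using this
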